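-- pv_equiv track=rewrite | github.com/christinanguyen02/Coding101 | CS 303E/HackerRank12Recursion.py | bumpUpToEven
-- ===== SOURCE A (Python) =====
-- def bumpUpToEven(lst):
--     newLst = []
--     if len(lst) == 0:
--         return lst
--     else:
--         if lst[0] % 2 != 0:
--             newLst.append(lst[0] + 1)
--             return newLst + bumpUpToEven(lst[1:])
--         else:
--             newLst.append(lst[0])
--             return newLst + bumpUpToEven(lst[1:])
-- ===== SOURCE B (Python) =====
-- def bumpUpToEven(lst):
--     if len(lst) == 0:
--         return lst
--     result = []
--     for x in lst:
--         if x % 2 != 0: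
--             result.append(x + 1)
--         else:
--             result.append(x)
--     return result
-- ===== Notes on version B (the rewrite author's own statement) =====
-- stated objective: simpler
-- what changed: Replaces the recursion on lst[1:] with list concatenation by a single iterative accumulation loop over the elements.
import Mathlib
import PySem

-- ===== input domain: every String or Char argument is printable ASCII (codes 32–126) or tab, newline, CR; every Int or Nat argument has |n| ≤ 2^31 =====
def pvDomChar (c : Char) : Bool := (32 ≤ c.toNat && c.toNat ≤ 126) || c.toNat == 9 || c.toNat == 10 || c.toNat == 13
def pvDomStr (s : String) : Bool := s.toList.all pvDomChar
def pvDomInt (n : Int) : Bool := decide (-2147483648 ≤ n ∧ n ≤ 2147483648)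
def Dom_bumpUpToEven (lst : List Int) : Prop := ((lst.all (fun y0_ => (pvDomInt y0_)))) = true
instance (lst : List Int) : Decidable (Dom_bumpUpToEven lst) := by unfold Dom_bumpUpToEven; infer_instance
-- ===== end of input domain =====

-- B replaces A's recursion-with-concatenation by one iterative accumulation loop (simpler, linear).

-- ===== PORT A =====
-- literal transliteration of A: empty guard returns lst, otherwise head test and recursion on lst[1:]
def bumpUpToEven (lst : List Int) : List Int :=
  match lst with
  | [] => lst
  | x :: rest =>
    if PySem.Int.mod x 2 ≠ 0 then
      [x + 1] ++ bumpUpToEven rest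
    else
      [x] ++ bumpUpToEven rest

-- ===== PORT B =====
-- literal transliteration of Source B: empty guard, then a fold over lst accumulating `result`
def bumpUpToEven_alt (lst : List Int) : List Int :=
  if lst = [] then lst
  else
    lst.foldl (fun result x =>
      if PySem.Int.mod x 2 ≠ 0 then result ++ [x + 1] else result ++ [x]) []

-- ===== PRECONDITION & SPEC =====
def Spec_bumpUpToEven (lst : List Int) (out : List Int) : Prop := out = bumpUpToEven_alt lst
instance (lst : List Int) (out : List Int) : Decidable (Spec_bumpUpToEven lst out) := by unfold Spec_bumpUpToEven; infer_instance

-- ===== CLAIM (what is proved, stated in full; the proofs are below) =====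
def Claim_equal_bumpUpToEven : Prop := ∀ (lst : List Int), Dom_bumpUpToEven lst → Spec_bumpUpToEven lst (bumpUpToEven lst)

-- ===== LEMMAS AND PROOFS =====

theorem foldl_bump (lst acc : List Int) :
    lst.foldl (fun result x =>
      if PySem.Int.mod x 2 ≠ 0 then result ++ [x + 1] else result ++ [x]) acc
    = acc ++ lst.map (fun x => if PySem.Int.mod x 2 ≠ 0 then x + 1 else x) := by
  induction lst generalizing acc with
  | nil => simp
  | cons x rest ih =>
    simp only [List.foldl, List.map]
    split_ifs with h <;> rw [ih] <;> simp

theorem bumpUpToEven_eq_map (lst : List Int) :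
    bumpUpToEven lst = lst.map (fun x => if PySem.Int.mod x 2 ≠ 0 then x + 1 else x) := by
  induction lst with
  | nil => rfl
  | cons x rest ih =>
    simp only [bumpUpToEven, List.map]
    split_ifs with h <;> simp [ih, h]

-- ===== VERDICT (by name: the statement is the Claim_ definition above) =====
theorem bumpUpToEven_spec : Claim_equal_bumpUpToEven := by
  intro lst _
  unfold Spec_bumpUpToEven bumpUpToEven_alt
  cases lst with
  | nil => rfl
  | cons x rest =>
    simp only [reduceCtorEq, List.foldl]
    rw [foldl_bump, bumpUpToEven_eq_map]
    simp only [List.map]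
    split_ifs <;> simp_all [PySem.Int.mod] <;> omega
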